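-- pv_equiv track=rewrite | github.com/iop07695432/fastdbchkrep | src/fastdbchkrep/report/mysql/generator.py | _extract_table_lines
-- ===== SOURCE A (Python) =====
-- from typing import Any, Callable, Dict, List, Optional, Tuple
--
-- def _extract_table_lines(lines: List[str], marker: str) -> List[str]:
--     start_idx = None
--     for idx, line in enumerate(lines):
--         if marker in line:
--             start_idx = idx + 1
--             break
--     if start_idx is None:
--         return []
--
--     table_lines: List[str] = []
--     for line in lines[start_idx:]:
--         if not line.strip():
--             if table_lines:
--                 break
--             continue
--         if line.startswith('+') or line.startswith('|'):
--             table_lines.append(line.rstrip())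
--             continue
--         if table_lines:
--             break
--
--     return table_lines
-- ===== SOURCE B (Python) =====
-- def _extract_table_lines(lines, marker):
--     # locate the line after the first line containing the marker
--     start = next((i + 1 for i, line in enumerate(lines) if marker in line), None)
--     if start is None:
--         return []
--
--     def is_table(line):
--         return line.startswith(('+', '|'))
--
--     # drop everything before the first table line, then collect the table run
--     body = lines[start:]
--     while body and not is_table(body[0]):
--         body = body[1:]
--     table = []
--     for line in body:
--         if not is_table(line):
--             break
--         table.append(line.rstrip())
--     return table
-- ===== Notes on version B (the rewrite author's own statement) =====
-- stated objective: alternative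
-- what changed: Replaces A's single stateful loop with its table_lines-empty flag (which simultaneously skips preamble, collects table lines and decides when to stop) by a three-phase decomposition: locate the marker index with next/enumerate, then an explicit drop of the non-table preamble, then a separate collect-until-non-table loop; blank lines need no special handling because they are simply not table lines.
import Mathlib
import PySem

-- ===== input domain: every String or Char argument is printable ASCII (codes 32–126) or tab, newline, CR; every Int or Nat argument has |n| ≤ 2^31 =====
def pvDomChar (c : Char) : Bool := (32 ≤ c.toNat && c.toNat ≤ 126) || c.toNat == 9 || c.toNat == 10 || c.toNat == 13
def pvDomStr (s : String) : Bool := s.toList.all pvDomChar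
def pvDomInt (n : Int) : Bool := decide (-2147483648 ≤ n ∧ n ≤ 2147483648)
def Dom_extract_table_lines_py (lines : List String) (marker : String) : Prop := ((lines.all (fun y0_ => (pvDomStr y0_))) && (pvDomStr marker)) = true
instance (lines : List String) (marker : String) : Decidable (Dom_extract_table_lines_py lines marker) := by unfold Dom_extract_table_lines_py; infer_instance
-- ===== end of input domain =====

-- B replaces A's single stateful loop (with its table_lines-empty flag) by a
-- three-phase decomposition: find the marker index, drop the non-table preamble,
-- then collect the run of table lines; same return value (objective: alternative).

-- ===== PORT A =====
-- the enumerate/break loop that computes start_idx (None = marker absent)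
def pvStartA (lines : List String) (marker : String) (idx : Int) : Option Int :=
  match lines with
  | [] => none
  | l :: rest => if PySem.Str.isIn marker l then some (idx + 1) else pvStartA rest marker (idx + 1)

-- the second for-loop of A, carrying table_lines as accumulator
def pvLoopA (lines : List String) (acc : List String) : List String :=
  match lines with
  | [] => acc
  | l :: rest =>
    if PySem.Str.strip l = "" then
      (if acc ≠ [] then acc else pvLoopA rest acc)
    else if PySem.Str.startswith l "+" || PySem.Str.startswith l "|" then
      pvLoopA rest (acc ++ [PySem.Str.rstrip l])
    else if acc ≠ [] then acc else pvLoopA rest acc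

def extract_table_lines_py (lines : List String) (marker : String) : List String :=
  match pvStartA lines marker 0 with
  | none => []
  | some s => pvLoopA (PySem.List.slice lines (some s) none) []

-- ===== PORT B =====
def pvIsTable (line : String) : Bool :=
  PySem.Str.startswith line "+" || PySem.Str.startswith line "|"

-- next((i + 1 for i, line in enumerate(lines) if marker in line), None)
def pvFindStart (lines : List String) (marker : String) : Option Int :=
  (PySem.List.enumerate lines 0).findSome?
    (fun p => if PySem.Str.isIn marker p.2 then some (p.1 + 1) else none)

-- while body and not is_table(body[0]): body = body[1:]
def pvDropPre (body : List String) : List String :=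
  match body with
  | [] => []
  | l :: rest => if pvIsTable l then l :: rest else pvDropPre rest

-- for line in body: if not is_table(line): break; table.append(line.rstrip())
def pvTakeTable (body : List String) : List String :=
  match body with
  | [] => []
  | l :: rest => if pvIsTable l then PySem.Str.rstrip l :: pvTakeTable rest else []

def extract_table_lines_py_alt (lines : List String) (marker : String) : List String :=
  match pvFindStart lines marker with
  | none => []
  | some s => pvTakeTable (pvDropPre (PySem.List.slice lines (some s) none))

-- ===== PRECONDITION & SPEC =====
def Spec_extract_table_lines_py (lines : List String) (marker : String) (out : List String) : Prop := out = extract_table_lines_py_alt lines marker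
instance (lines : List String) (marker : String) (out : List String) : Decidable (Spec_extract_table_lines_py lines marker out) := by unfold Spec_extract_table_lines_py; infer_instance

-- ===== CLAIM (what is proved, stated in full; the proofs are below) =====
def Claim_equal_extract_table_lines_py : Prop := ∀ (lines : List String) (marker : String), Dom_extract_table_lines_py lines marker → Spec_extract_table_lines_py lines marker (extract_table_lines_py lines marker)

-- ===== LEMMAS AND PROOFS =====

-- a line whose first char is a non-space char is never blank
theorem pv_prefix_not_blank (l : String) (c : Char) (t : List Char)
    (hc : PySem.Chars.isspace c = false) (ht : l.toList = c :: t) :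
    ¬ PySem.Str.strip l = "" := by
  intro hb
  have hb2 : PySem.Chars.strip l.toList = [] := by
    have := congrArg String.toList hb
    simpa [PySem.Str.toList_strip] using this
  rw [ht] at hb2
  simp [PySem.Chars.strip, PySem.Chars.lstrip, PySem.Chars.rstrip,
    hc, List.dropWhile_eq_nil_iff] at hb2
  have := hb2 c (by simp)
  simp [hc] at this

-- a table line ('+'/'|' first char) is never blank
theorem pv_table_not_blank (l : String) (h : pvIsTable l = true) :
    ¬ PySem.Str.strip l = "" := by
  unfold pvIsTable at h
  rcases Bool.or_eq_true_iff.mp h with h1 | h1 <;>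
  · rw [PySem.Str.startswith_eq] at h1
    obtain ⟨t, ht⟩ := (PySem.Chars.startswith_iff _ _).mp h1
    exact pv_prefix_not_blank l _ t (by decide) ht.symm

-- both start searches agree
theorem pv_start_eq (lines : List String) (marker : String) (k : Int) :
    pvStartA lines marker k =
      (PySem.List.enumerate lines k).findSome?
        (fun p => if PySem.Str.isIn marker p.2 then some (p.1 + 1) else none) := by
  induction lines generalizing k with
  | nil => simp [pvStartA, PySem.List.enumerate_nil]
  | cons l rest ih =>
    by_cases h : PySem.Chars.isIn marker.toList l.toList = true <;>
      simp [pvStartA, PySem.List.enumerate_cons, h, ih]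

-- collecting phase of A, with a non-empty accumulator
theorem pv_loopA_collect (xs : List String) (acc : List String) (h : acc ≠ []) :
    pvLoopA xs acc = acc ++ pvTakeTable xs := by
  induction xs generalizing acc with
  | nil => simp [pvLoopA, pvTakeTable]
  | cons l rest ih =>
    by_cases htab : pvIsTable l = true
    · have hblank := pv_table_not_blank l htab
      have h2 : (PySem.Str.startswith l "+" || PySem.Str.startswith l "|") = true := htab
      rw [pvLoopA, pvTakeTable, if_neg hblank, if_pos h2, if_pos htab, ih _ (by simp)]
      simp
    · rw [pvLoopA, pvTakeTable]
      by_cases hblank : PySem.Str.strip l = "" <;>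
        simp [hblank, h, pvIsTable] at htab ⊢ <;> simp [htab]

-- A's loop from the empty accumulator = drop preamble, then take the table run
theorem pv_loopA_eq (xs : List String) :
    pvLoopA xs [] = pvTakeTable (pvDropPre xs) := by
  induction xs with
  | nil => simp [pvLoopA, pvDropPre, pvTakeTable]
  | cons l rest ih =>
    by_cases htab : pvIsTable l = true
    · have hblank := pv_table_not_blank l htab
      have h2 := htab
      unfold pvIsTable at h2
      rw [pvLoopA, pvDropPre, if_pos htab, pvTakeTable, if_pos htab]
      rw [if_neg hblank, if_pos h2]
      simpa using pv_loopA_collect rest [PySem.Str.rstrip l] (by simp)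
    · have h2 : (PySem.Str.startswith l "+" || PySem.Str.startswith l "|") = false := by
        simpa [pvIsTable] using htab
      rw [pvLoopA, pvDropPre, if_neg htab]
      by_cases hblank : PySem.Str.strip l = ""
      · rw [if_pos hblank]; simpa using ih
      · rw [if_neg hblank,
          if_neg (show ¬ ((PySem.Str.startswith l "+" || PySem.Str.startswith l "|") = true) from htab)]
        simpa using ih

-- ===== VERDICT (by name: the statement is the Claim_ definition above) =====
theorem extract_table_lines_py_spec : Claim_equal_extract_table_lines_py := by
  intro lines marker _
  unfold Spec_extract_table_lines_py extract_table_lines_py extract_table_lines_py_alt pvFindStart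
  rw [← pv_start_eq]
  cases pvStartA lines marker 0 with
  | none => rfl
  | some s => simp [pv_loopA_eq]
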